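-- pv_equiv track=rewrite | github.com/chrys87/dragonFM | src/dragonfilemanager/core/inputManager.py | unifyKey
-- ===== SOURCE A (Python) =====
-- def unifyKey(keys):
--     newKey = ''
--     if not keys:
--         return newKey
--     if keys == '':
--         return newKey
--     for k in keys:
--         if ord(k) == 9:
--             newKey += 'KEY_TAB'
--         elif (len(keys) > 1) and (ord(k) == 33):
--             newKey += 'KEY_TAB'
--         else:
--             newKey += k
--     return newKey
-- ===== SOURCE B (Python) =====
-- def unifyKey(keys):
--     if not keys:
--         return ''
--     newKey = keys.replace('\t', 'KEY_TAB')
--     if len(keys) > 1: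
--         newKey = newKey.replace('!', 'KEY_TAB')
--     return newKey
-- ===== Notes on version B (the rewrite author's own statement) =====
-- stated objective: faster
-- what changed: Replaces the per-character string-accumulation loop by chained str.replace passes (tab always, bang only for multi-character input), which run in C without quadratic concatenation; safe because the replacement text contains neither replaced character.
import Mathlib
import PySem

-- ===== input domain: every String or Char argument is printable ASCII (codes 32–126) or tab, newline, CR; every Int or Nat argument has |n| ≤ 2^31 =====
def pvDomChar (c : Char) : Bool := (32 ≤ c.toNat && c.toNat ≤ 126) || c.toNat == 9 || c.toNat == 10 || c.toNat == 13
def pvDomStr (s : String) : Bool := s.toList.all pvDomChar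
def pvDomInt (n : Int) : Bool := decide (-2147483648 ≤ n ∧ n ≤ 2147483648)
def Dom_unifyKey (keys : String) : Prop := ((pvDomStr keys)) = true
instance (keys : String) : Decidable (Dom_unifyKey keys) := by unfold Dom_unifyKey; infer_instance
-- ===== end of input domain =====

-- B replaces A's per-character accumulation loop by two str.replace passes ('\t'→'KEY_TAB' always,
-- '!'→'KEY_TAB' only when len(keys) > 1); safe since 'KEY_TAB' contains neither character.


-- ===== PORT A =====
-- literal port: 'if not keys' and 'if keys == ""' are both the emptiness test on a str;
-- the for-loop over the characters is a foldl over keys.toList accumulating the new string.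
def unifyKey (keys : String) : String :=
  let newKey : List Char := []
  if keys.toList = [] then String.ofList newKey
  else if keys.toList = [] then String.ofList newKey
  else String.ofList (keys.toList.foldl (fun newKey k =>
    if k.toNat == 9 then newKey ++ "KEY_TAB".toList
    else if (decide (1 < keys.toList.length)) && (k.toNat == 33) then newKey ++ "KEY_TAB".toList
    else newKey ++ [k]) newKey)

-- ===== PORT B =====
def unifyKey_alt (keys : String) : String :=
  if keys.toList = [] then ""
  else
    let newKey := PySem.Str.replace keys "\t" "KEY_TAB"
    if 1 < keys.toList.length then PySem.Str.replace newKey "!" "KEY_TAB" else newKey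

-- ===== PRECONDITION & SPEC =====
def Spec_unifyKey (keys : String) (out : String) : Prop := out = unifyKey_alt keys
instance (keys : String) (out : String) : Decidable (Spec_unifyKey keys out) := by unfold Spec_unifyKey; infer_instance

-- ===== CLAIM (what is proved, stated in full; the proofs are below) =====
def Claim_equal_unifyKey : Prop := ∀ (keys : String), Dom_unifyKey keys → Spec_unifyKey keys (unifyKey keys)

-- ===== LEMMAS AND PROOFS =====

-- replacement of a single character c by `new`, as a flatMap
def pvSub (c : Char) (new : List Char) (k : Char) : List Char :=
  if k = c then new else [k]

theorem pvCharOfToNat {k c : Char} (h : k.toNat = c.toNat) : k = c :=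
  Char.ext (UInt32.toNat_inj.mp h)

theorem beq9 (k : Char) : (k.toNat == 9) = (k == '\t') := by
  by_cases h : k = '\t'
  · subst h; decide
  · have hn : ¬ k.toNat = 9 := fun hh => h (pvCharOfToNat hh)
    simp [h, hn]

theorem beq33 (k : Char) : (k.toNat == 33) = (k == '!') := by
  by_cases h : k = '!'
  · subst h; decide
  · have hn : ¬ k.toNat = 33 := fun hh => h (pvCharOfToNat hh)
    simp [h, hn]

theorem go_single (c : Char) (new : List Char) :
    ∀ (l : List Char) (fuel : Nat) (acc : List Char), l.length ≤ fuel →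
      PySem.Chars.replace.go [c] new fuel l acc = acc.reverse ++ l.flatMap (pvSub c new) := by
  intro l
  induction l with
  | nil =>
    intro fuel acc _
    cases fuel <;> simp [PySem.Chars.replace.go]
  | cons a t ih =>
    intro fuel acc h
    cases fuel with
    | zero => simp at h
    | succ f =>
      by_cases hca : c = a
      · subst hca
        rw [show PySem.Chars.replace.go [c] new (f+1) (c :: t) acc
              = PySem.Chars.replace.go [c] new f t (new.reverse ++ acc) from by
            simp [PySem.Chars.replace.go, List.isPrefixOf]]
        rw [ih f (new.reverse ++ acc) (by simpa using h)]
        simp [pvSub]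
      · rw [show PySem.Chars.replace.go [c] new (f+1) (a :: t) acc
              = PySem.Chars.replace.go [c] new f t (a :: acc) from by
            simp [PySem.Chars.replace.go, List.isPrefixOf, hca]]
        rw [ih f (a :: acc) (by simpa using h)]
        simp only [List.flatMap_cons, pvSub]
        rw [if_neg (fun hh => hca hh.symm)]
        simp

theorem replace_single (s : List Char) (c : Char) (new : List Char) :
    PySem.Chars.replace s [c] new = s.flatMap (pvSub c new) := by
  unfold PySem.Chars.replace
  simpa using go_single c new s s.length [] le_rfl

-- the two-pass flatMap equals the one-pass combined substitution (when len > 1)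
theorem two_pass (l : List Char) :
    (l.flatMap (pvSub '\t' "KEY_TAB".toList)).flatMap (pvSub '!' "KEY_TAB".toList) =
      l.flatMap (fun k => if k.toNat == 9 then "KEY_TAB".toList
        else if true && (k.toNat == 33) then "KEY_TAB".toList else [k]) := by
  rw [List.flatMap_assoc]
  apply List.flatMap_congr
  intro k _
  rw [beq9, beq33]
  by_cases h9 : k = '\t'
  · subst h9; decide
  · by_cases h33 : k = '!'
    · subst h33; decide
    · simp [pvSub, h9, h33]

-- single-pass case (len ≤ 1): only the tab branch of A fires
theorem one_pass (l : List Char) :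
    l.flatMap (pvSub '\t' "KEY_TAB".toList) =
      l.flatMap (fun k => if k.toNat == 9 then "KEY_TAB".toList
        else if false && (k.toNat == 33) then "KEY_TAB".toList else [k]) := by
  apply List.flatMap_congr
  intro k _
  rw [beq9]
  by_cases h9 : k = '\t'
  · subst h9; decide
  · simp [pvSub, h9]

-- A's foldl as a flatMap
theorem foldl_append_gen (g : Char → List Char) (l : List Char) (acc : List Char) :
    l.foldl (fun a x => a ++ g x) acc = acc ++ l.flatMap g := by
  induction l generalizing acc with
  | nil => simp
  | cons a t ih => simp [ih]

theorem foldA (l : List Char) (b : Bool) :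
    l.foldl (fun newKey k =>
      if k.toNat == 9 then newKey ++ "KEY_TAB".toList
      else if b && (k.toNat == 33) then newKey ++ "KEY_TAB".toList
      else newKey ++ [k]) [] =
    l.flatMap (fun k => if k.toNat == 9 then "KEY_TAB".toList
      else if b && (k.toNat == 33) then "KEY_TAB".toList else [k]) := by
  have he : (fun (newKey : List Char) (k : Char) =>
      if k.toNat == 9 then newKey ++ "KEY_TAB".toList
      else if b && (k.toNat == 33) then newKey ++ "KEY_TAB".toList
      else newKey ++ [k]) = (fun newKey k => newKey ++
        (if k.toNat == 9 then "KEY_TAB".toList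
         else if b && (k.toNat == 33) then "KEY_TAB".toList else [k])) := by
    funext nk k; split_ifs <;> rfl
  rw [he]
  simpa using foldl_append_gen
    (fun k => if k.toNat == 9 then "KEY_TAB".toList
      else if b && (k.toNat == 33) then "KEY_TAB".toList else [k]) l []

theorem toList_eq (keys : String) : (unifyKey keys).toList = (unifyKey_alt keys).toList := by
  unfold unifyKey unifyKey_alt
  by_cases he : keys.toList = []
  · rw [if_pos he, if_pos he]
  · rw [if_neg he, if_neg he, if_neg he]
    by_cases hl : 1 < keys.toList.length
    · rw [if_pos hl]
      have hd : decide (1 < keys.toList.length) = true := by simpa using hl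
      rw [String.toList_ofList, foldA keys.toList (decide (1 < keys.toList.length)), hd,
        PySem.Str.toList_replace, PySem.Str.toList_replace,
        show "\t".toList = ['\t'] from by decide, show "!".toList = ['!'] from by decide,
        replace_single, replace_single]
      exact (two_pass keys.toList).symm
    · rw [if_neg hl]
      have hd : decide (1 < keys.toList.length) = false := by simpa using hl
      rw [String.toList_ofList, foldA keys.toList (decide (1 < keys.toList.length)), hd,
        PySem.Str.toList_replace,
        show "\t".toList = ['\t'] from by decide, replace_single]
      exact (one_pass keys.toList).symm

-- ===== VERDICT (by name: the statement is the Claim_ definition above) =====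
theorem unifyKey_spec : Claim_equal_unifyKey := by
  intro keys _
  unfold Spec_unifyKey
  have h := toList_eq keys
  calc unifyKey keys = String.ofList (unifyKey keys).toList := by rw [String.ofList_toList]
    _ = String.ofList (unifyKey_alt keys).toList := by rw [h]
    _ = unifyKey_alt keys := by rw [String.ofList_toList]
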